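-- pv_equiv track=rewrite | github.com/ict-cspark/Algorithm | 프로그래머스/unrated/159994. 카드 뭉치/카드 뭉치.py | solution
-- ===== SOURCE A (Python) =====
-- def solution(cards1, cards2, goal):
--     answer = 'Yes'
--     for i in range(len(goal)):
--         if cards1 and goal[i] == cards1[0]:
--             cards1.pop(0)
--         elif cards2 and goal[i] == cards2[0]:
--             cards2.pop(0)
--         else:
--             answer = 'No'
--
--     return answer
-- ===== SOURCE B (Python) =====
-- def solution(cards1, cards2, goal):
--     i = j = 0
--     ok = True
--     for g in goal:
--         if i < len(cards1) and cards1[i] == g: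
--             i += 1
--         elif j < len(cards2) and cards2[j] == g:
--             j += 1
--         else:
--             ok = False
--     return 'Yes' if ok else 'No'
-- ===== Notes on version B (the rewrite author's own statement) =====
-- stated objective: alternative
-- what changed: Replaces the pop(0) list-mutation scan with two advancing indices over untouched input lists and a boolean flag.
import Mathlib
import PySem

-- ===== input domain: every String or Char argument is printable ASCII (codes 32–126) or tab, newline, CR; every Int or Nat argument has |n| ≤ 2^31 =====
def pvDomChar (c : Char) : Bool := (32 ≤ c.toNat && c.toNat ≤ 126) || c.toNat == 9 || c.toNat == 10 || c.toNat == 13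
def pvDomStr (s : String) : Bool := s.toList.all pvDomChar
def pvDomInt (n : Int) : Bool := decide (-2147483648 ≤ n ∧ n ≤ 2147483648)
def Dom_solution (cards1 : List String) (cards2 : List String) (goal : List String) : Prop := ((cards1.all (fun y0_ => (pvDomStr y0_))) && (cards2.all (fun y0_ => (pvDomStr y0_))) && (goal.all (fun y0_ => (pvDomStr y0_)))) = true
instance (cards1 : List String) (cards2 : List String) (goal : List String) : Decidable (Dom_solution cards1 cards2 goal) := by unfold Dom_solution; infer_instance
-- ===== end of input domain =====

-- B replaces A's pop(0) mutation scan by two advancing indices over untouched lists (alternative decomposition, no mutation).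
-- A mutates cards1/cards2 in place (pop(0)); the equivalence proved here is about the RETURN value only.

-- ===== PORT A =====
-- A's for-loop over goal, carrying the shrinking cards1/cards2 and the answer string.
def solutionA_loop (goal : List String) (c1 : List String) (c2 : List String) (ans : String) : String :=
  match goal with
  | [] => ans
  | g :: gs =>
    if c1.head? = some g then solutionA_loop gs c1.tail c2 ans
    else if c2.head? = some g then solutionA_loop gs c1 c2.tail ans
    else solutionA_loop gs c1 c2 "No"

def solution (cards1 : List String) (cards2 : List String) (goal : List String) : String :=
  solutionA_loop goal cards1 cards2 "Yes"

-- ===== PORT B =====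
-- B's loop: two indices into the fixed lists and a boolean flag.
def solutionB_loop (c1 : List String) (c2 : List String) (goal : List String) (i : Nat) (j : Nat) (ok : Bool) : Bool :=
  match goal with
  | [] => ok
  | g :: gs =>
    if c1[i]? = some g then solutionB_loop c1 c2 gs (i + 1) j ok
    else if c2[j]? = some g then solutionB_loop c1 c2 gs i (j + 1) ok
    else solutionB_loop c1 c2 gs i j false

def solution_alt (cards1 : List String) (cards2 : List String) (goal : List String) : String :=
  if solutionB_loop cards1 cards2 goal 0 0 true then "Yes" else "No"

-- ===== PRECONDITION & SPEC =====
def Spec_solution (cards1 : List String) (cards2 : List String) (goal : List String) (out : String) : Prop := out = solution_alt cards1 cards2 goal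
instance (cards1 : List String) (cards2 : List String) (goal : List String) (out : String) : Decidable (Spec_solution cards1 cards2 goal out) := by unfold Spec_solution; infer_instance

-- ===== CLAIM (what is proved, stated in full; the proofs are below) =====
def Claim_equal_solution : Prop := ∀ (cards1 : List String) (cards2 : List String) (goal : List String), Dom_solution cards1 cards2 goal → Spec_solution cards1 cards2 goal (solution cards1 cards2 goal)

-- ===== LEMMAS AND PROOFS =====

-- Invariant: A running on the drop-suffixes equals B running with the indices.
theorem loop_agree (c1 c2 : List String) (goal : List String) :
    ∀ (i j : Nat) (ok : Bool),
      solutionA_loop goal (c1.drop i) (c2.drop j) (if ok then "Yes" else "No")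
        = (if solutionB_loop c1 c2 goal i j ok then "Yes" else "No") := by
  induction goal with
  | nil => intro i j ok; rfl
  | cons g gs ih =>
    intro i j ok
    rw [solutionA_loop, solutionB_loop]
    have h1 : (c1.drop i).head? = c1[i]? := List.head?_drop ..
    have h2 : (c2.drop j).head? = c2[j]? := List.head?_drop ..
    have t1 : (c1.drop i).tail = c1.drop (i + 1) := by
      rw [List.tail_drop]
    have t2 : (c2.drop j).tail = c2.drop (j + 1) := by
      rw [List.tail_drop]
    rw [h1, h2, t1, t2]
    by_cases e1 : c1[i]? = some g
    · simp only [e1]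
      exact ih (i + 1) j ok
    · rw [if_neg e1, if_neg e1]
      by_cases e2 : c2[j]? = some g
      · simp only [e2]
        exact ih i (j + 1) ok
      · rw [if_neg e2, if_neg e2]
        have := ih i j false
        simpa using this

-- ===== VERDICT (by name: the statement is the Claim_ definition above) =====
theorem solution_spec : Claim_equal_solution := by
  intro c1 c2 goal _
  unfold Spec_solution solution solution_alt
  have := loop_agree c1 c2 goal 0 0 true
  simpa using this
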